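-- pv_equiv track=rewrite | github.com/toniantunovi/lucidshark | src/lucidshark/cli/commands/init.py | _remove_managed_section
-- ===== SOURCE A (Python) =====
-- def _remove_managed_section(content: str, start_marker: str, end_marker: str) -> str:
--     """Remove a managed section delimited by markers from content.
--
--     Args:
--         content: The full file content.
--         start_marker: Start of the managed section (prefix match).
--         end_marker: End of the managed section (exact line match).
--
--     Returns:
--         Content with the managed section removed.
--     """
--     lines = content.split("\n")
--     result = []
--     in_section = False
--     for line in lines:
--         if not in_section and start_marker in line:
--             in_section = True
--             continue
--         if in_section and end_marker in line:
--             in_section = False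
--             continue
--         if not in_section:
--             result.append(line)
--     return "\n".join(result)
-- ===== SOURCE B (Python) =====
-- def _remove_managed_section(content: str, start_marker: str, end_marker: str) -> str:
--     # Find-and-splice: repeatedly locate the next start-marker line and the
--     # matching end-marker line by index search, and splice the block out with
--     # slices -- no per-line state machine.
--     lines = content.split("\n")
--     out = []
--     while True:
--         i = next((k for k, l in enumerate(lines) if start_marker in l), None)
--         if i is None:
--             out.extend(lines)
--             break
--         out.extend(lines[:i])
--         rest = lines[i + 1:]
--         j = next((k for k, l in enumerate(rest) if end_marker in l), None)
--         if j is None: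
--             break
--         lines = rest[j + 1:]
--     return "\n".join(out)
-- ===== Notes on version B (the rewrite author's own statement) =====
-- stated objective: alternative
-- what changed: Replaced A's single pass with an in_section boolean flag by a find-and-splice scheme: repeatedly locate the next start-marker line and the matching end-marker line by index search and splice the delimited block out with list slices.
import Mathlib
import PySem

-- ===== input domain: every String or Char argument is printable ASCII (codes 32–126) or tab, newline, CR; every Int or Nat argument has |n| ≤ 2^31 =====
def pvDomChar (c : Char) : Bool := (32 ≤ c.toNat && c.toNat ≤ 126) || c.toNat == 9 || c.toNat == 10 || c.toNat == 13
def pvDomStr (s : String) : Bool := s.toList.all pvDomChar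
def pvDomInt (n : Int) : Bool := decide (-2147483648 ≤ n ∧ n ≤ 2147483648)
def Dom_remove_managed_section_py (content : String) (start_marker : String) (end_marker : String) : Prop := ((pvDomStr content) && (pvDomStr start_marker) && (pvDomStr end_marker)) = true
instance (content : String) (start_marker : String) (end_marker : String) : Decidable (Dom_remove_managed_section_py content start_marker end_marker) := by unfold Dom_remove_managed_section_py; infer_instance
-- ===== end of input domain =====

-- B replaces A's per-line state machine by a find-and-splice scheme: locate the next
-- start/end marker lines by index search and splice the block out with slices (alternative, same cost).

-- ===== PORT A =====
-- loop body of A's for-loop, on state (result, in_section)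
def pvStepA (start_marker end_marker : List Char) (st : List (List Char) × Bool) (line : List Char) : List (List Char) × Bool :=
  if !st.2 && PySem.Chars.isIn start_marker line then (st.1, true)
  else if st.2 && PySem.Chars.isIn end_marker line then (st.1, false)
  else if !st.2 then (st.1 ++ [line], st.2)
  else st

def remove_managed_section_py (content : String) (start_marker : String) (end_marker : String) : String :=
  let lines := PySem.Chars.splitOn content.toList "\n".toList
  let res := lines.foldl (pvStepA start_marker.toList end_marker.toList) ([], false)
  String.ofList (PySem.Chars.join "\n".toList res.1)

-- ===== PORT B =====
-- port of Source B's `next((k for k, l in enumerate(lines) if marker in l), None)`: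
-- index of the first line containing the marker
def pvFindLine (m : List Char) : List (List Char) → Option Nat
  | [] => none
  | l :: ls => if PySem.Chars.isIn m l then some 0 else (pvFindLine m ls).map (· + 1)

-- Source B's while loop: splice out [start line .. end line], continue past it
def pvSplice (sm em : List Char) (ls : List (List Char)) : List (List Char) :=
  match h : pvFindLine sm ls with
  | none => ls
  | some i =>
      match pvFindLine em (ls.drop (i + 1)) with
      | none => ls.take i
      | some j => ls.take i ++ pvSplice sm em ((ls.drop (i + 1)).drop (j + 1))
termination_by ls.length
decreasing_by
  cases ls with
  | nil => simp [pvFindLine] at h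
  | cons a as => simp only [List.length_drop, List.length_cons]; omega

def remove_managed_section_py_alt (content : String) (start_marker : String) (end_marker : String) : String :=
  String.ofList (PySem.Chars.join "\n".toList
    (pvSplice start_marker.toList end_marker.toList (PySem.Chars.splitOn content.toList "\n".toList)))

-- ===== PRECONDITION & SPEC =====
def Spec_remove_managed_section_py (content : String) (start_marker : String) (end_marker : String) (out : String) : Prop := out = remove_managed_section_py_alt content start_marker end_marker
instance (content : String) (start_marker : String) (end_marker : String) (out : String) : Decidable (Spec_remove_managed_section_py content start_marker end_marker out) := by unfold Spec_remove_managed_section_py; infer_instance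

-- ===== CLAIM (what is proved, stated in full; the proofs are below) =====
def Claim_equal_remove_managed_section_py : Prop := ∀ (content : String) (start_marker : String) (end_marker : String), Dom_remove_managed_section_py content start_marker end_marker → Spec_remove_managed_section_py content start_marker end_marker (remove_managed_section_py content start_marker end_marker)

-- ===== LEMMAS AND PROOFS =====
-- A's fold from in_section = false, lines without a start marker: appends them all
theorem pvFoldA_false_none (sm em : List Char) (ls : List (List Char)) (acc : List (List Char))
    (h : pvFindLine sm ls = none) :
    List.foldl (pvStepA sm em) (acc, false) ls = (acc ++ ls, false) := by
  induction ls generalizing acc with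
  | nil => simp
  | cons l ls ih =>
      simp only [pvFindLine] at h
      by_cases hl : PySem.Chars.isIn sm l = true
      · simp [hl] at h
      · simp [hl] at h
        simp [List.foldl_cons, pvStepA, hl, ih _ h]

-- A's fold from false, first start-marker line has index i: flips to true there,
-- having appended exactly the first i lines
theorem pvFoldA_false_some (sm em : List Char) (ls : List (List Char)) (i : Nat) (acc : List (List Char))
    (h : pvFindLine sm ls = some i) :
    List.foldl (pvStepA sm em) (acc, false) ls
      = List.foldl (pvStepA sm em) (acc ++ ls.take i, true) (ls.drop (i + 1)) := by
  induction ls generalizing i acc with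
  | nil => simp [pvFindLine] at h
  | cons l ls ih =>
      simp only [pvFindLine] at h
      by_cases hl : PySem.Chars.isIn sm l = true
      · simp only [hl, if_pos] at h
        obtain rfl : i = 0 := by simpa using h.symm
        simp [List.foldl_cons, pvStepA, hl]
      · simp [hl] at h
        obtain ⟨j, hj, rfl⟩ := h
        have hstep : pvStepA sm em (acc, false) l = (acc ++ [l], false) := by
          simp [pvStepA, hl]
        rw [List.foldl_cons, hstep, ih j _ hj]
        simp
  
-- A's fold from in_section = true, no end marker: drops everything
theorem pvFoldA_true_none (sm em : List Char) (ls : List (List Char)) (acc : List (List Char))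
    (h : pvFindLine em ls = none) :
    List.foldl (pvStepA sm em) (acc, true) ls = (acc, true) := by
  induction ls generalizing acc with
  | nil => simp
  | cons l ls ih =>
      simp only [pvFindLine] at h
      by_cases hl : PySem.Chars.isIn em l = true
      · simp [hl] at h
      · simp [hl] at h
        simp [List.foldl_cons, pvStepA, hl, ih _ h]

-- A's fold from true, first end-marker line has index j: flips back to false there
theorem pvFoldA_true_some (sm em : List Char) (ls : List (List Char)) (j : Nat) (acc : List (List Char))
    (h : pvFindLine em ls = some j) :
    List.foldl (pvStepA sm em) (acc, true) ls
      = List.foldl (pvStepA sm em) (acc, false) (ls.drop (j + 1)) := by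
  induction ls generalizing j acc with
  | nil => simp [pvFindLine] at h
  | cons l ls ih =>
      simp only [pvFindLine] at h
      by_cases hl : PySem.Chars.isIn em l = true
      · simp only [hl, if_pos] at h
        obtain rfl : j = 0 := by simpa using h.symm
        simp [List.foldl_cons, pvStepA, hl]
      · simp [hl] at h
        obtain ⟨k, hk, rfl⟩ := h
        have hstep : pvStepA sm em (acc, true) l = (acc, true) := by
          simp [pvStepA, hl]
        rw [List.foldl_cons, hstep, List.drop_succ_cons]
        exact ih k _ hk

-- main invariant: A's fold from false computes acc ++ pvSplice
theorem pvFoldA_eq_splice (sm em : List Char) :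
    ∀ (n : Nat) (ls : List (List Char)), ls.length ≤ n → ∀ (acc : List (List Char)),
    (List.foldl (pvStepA sm em) (acc, false) ls).1 = acc ++ pvSplice sm em ls := by
  intro n
  induction n with
  | zero =>
      intro ls h acc
      obtain rfl : ls = [] := List.eq_nil_of_length_eq_zero (Nat.le_zero.mp h)
      rw [pvSplice]
      simp [pvFindLine]
  | succ n ih =>
      intro ls h acc
      rw [pvSplice]
      split
      · next hs => rw [pvFoldA_false_none sm em ls acc hs]
      · next i hs =>
          rw [pvFoldA_false_some sm em ls i acc hs]
          split
          · next he => rw [pvFoldA_true_none sm em _ _ he]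
          · next j he =>
              rw [pvFoldA_true_some sm em _ j _ he]
              have hne : ls ≠ [] := by
                intro hnil; rw [hnil] at hs; simp [pvFindLine] at hs
              have hlen : ((ls.drop (i + 1)).drop (j + 1)).length ≤ n := by
                have := List.length_pos_iff.mpr hne
                simp only [List.length_drop]
                omega
              rw [ih _ hlen, List.append_assoc]

-- ===== VERDICT (by name: the statement is the Claim_ definition above) =====
theorem remove_managed_section_py_spec : Claim_equal_remove_managed_section_py := by
  intro content sm em _
  unfold Spec_remove_managed_section_py remove_managed_section_py remove_managed_section_py_alt
  simp only []
  rw [pvFoldA_eq_splice sm.toList em.toList (PySem.Chars.splitOn content.toList "\n".toList).length _ le_rfl]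
  simp
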